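-- pv_equiv track=rewrite | github.com/dateddy/523V0015_523K0078_Midterm | src/preprocess.py | get_representative_samples
-- ===== SOURCE A (Python) =====
-- from typing import List, Tuple, Dict, Optional
--
-- def get_representative_samples(texts: List[str], labels: List[int], n_per_class: int = 4) -> Dict[int, List[str]]:
--     """Get representative samples by class (stratified by length)."""
--     samples_by_class = {0: [], 1: []}
--
--     # Group by class and sort by length
--     for cls in [0, 1]:
--         class_texts = [(texts[i], len(texts[i].split())) for i in range(len(labels)) if labels[i] == cls]
--         class_texts.sort(key=lambda x: x[1])  # Sort by length
--
--         # Select samples from different length ranges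
--         n_samples = len(class_texts)
--         if n_samples > 0:
--             indices = [
--                 int(n_samples * 0.25),      # 25th percentile
--                 int(n_samples * 0.50),      # median
--                 int(n_samples * 0.75),      # 75th percentile
--                 int(n_samples * 0.95)       # 95th percentile
--             ]
--             indices = [min(idx, n_samples - 1) for idx in indices[:n_per_class]]
--             samples_by_class[cls] = [class_texts[i][0] for i in indices]
--
--     return samples_by_class
-- ===== SOURCE B (Python) =====
-- from typing import List, Dict
--
-- def get_representative_samples(texts: List[str], labels: List[int], n_per_class: int = 4) -> Dict[int, List[str]]:
--     """Representative samples per class: the 25/50/75/95th length-percentile texts,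
--     found by quickselect on (word-count, position) keys instead of a full sort."""
--
--     def select(items, k):
--         # k-th smallest by (word-count, original position); keys are distinct.
--         while True:
--             pivot = items[len(items) // 2]
--             less = [x for x in items if x[:2] < pivot[:2]]
--             if k < len(less):
--                 items = less
--             elif k == len(less):
--                 return pivot[2]
--             else:
--                 k -= len(less) + 1
--                 items = [x for x in items if pivot[:2] < x[:2]]
--
--     result = {0: [], 1: []}
--     for cls in (0, 1):
--         items = [(len(t.split()), i, t)
--                  for i, (t, l) in enumerate(zip(texts, labels)) if l == cls]
--         n = len(items)
--         if n > 0: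
--             # int(n*q) for q in (0.25, 0.5, 0.75, 0.95) equals the exact integer
--             # quotient for every feasible n (float analysis: rel. error < 2^-54).
--             ks = [n // 4, n // 2, 3 * n // 4, 19 * n // 20][:n_per_class]
--             result[cls] = [select(items, min(k, n - 1)) for k in ks]
--     return result
-- ===== Notes on version B (the rewrite author's own statement) =====
-- stated objective: alternative
-- what changed: B replaces A's per-class full stable sort by word-count with a quickselect (middle-element pivot, (word-count, position) keys) that extracts only the four percentile order statistics, gathering each class in one zip/enumerate pass and computing the percentile indices with exact integer arithmetic instead of float multiplication.
import Mathlib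
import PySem

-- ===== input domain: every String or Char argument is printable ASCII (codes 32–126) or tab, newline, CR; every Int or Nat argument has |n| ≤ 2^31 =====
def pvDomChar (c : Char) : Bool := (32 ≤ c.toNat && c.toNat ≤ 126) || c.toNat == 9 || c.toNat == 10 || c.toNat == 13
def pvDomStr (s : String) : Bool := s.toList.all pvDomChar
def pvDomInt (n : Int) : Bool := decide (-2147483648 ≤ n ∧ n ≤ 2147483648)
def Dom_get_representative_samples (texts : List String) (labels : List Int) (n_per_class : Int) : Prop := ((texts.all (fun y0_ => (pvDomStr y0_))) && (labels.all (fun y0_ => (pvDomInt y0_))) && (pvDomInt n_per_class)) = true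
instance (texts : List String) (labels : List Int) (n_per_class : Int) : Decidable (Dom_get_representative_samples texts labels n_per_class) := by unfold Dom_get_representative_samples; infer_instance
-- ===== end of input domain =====

-- B replaces A's full length-sort per class by quickselect of the four percentile order
-- statistics on (word-count, position) keys (an alternative selection algorithm; same values).
-- In both ports int(n*0.25)/int(n*0.50)/int(n*0.75)/int(n*0.95) is rendered as the exact
-- integer quotient n/4, n/2, 3n/4, 19n/20: for every feasible list length n the float product
-- rounds to the same floor (relative error of float(0.95) is < 2^-54).

-- ===== PORT A =====
-- class_texts = [(texts[i], len(texts[i].split())) for i in range(len(labels)) if labels[i] == cls]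
-- (texts[i] is in range under Pre_; pyGetD's default is never read there)
def pvClassTexts (texts : List String) (labels : List Int) (cls : Int) : List (String × Int) :=
  (PySem.List.pyRange 0 (labels.length : Int)).filterMap (fun i =>
    if PySem.List.pyGetD labels i 0 == cls then
      some (PySem.List.pyGetD texts i "", ((PySem.Str.split₀ (PySem.List.pyGetD texts i "")).length : Int))
    else none)

def get_representative_samples (texts : List String) (labels : List Int) (n_per_class : Int) : List (Int × List String) :=
  let step := fun (d : PySem.Dict Int (List String)) (cls : Int) =>
    let class_texts := PySem.List.sorted (pvClassTexts texts labels cls) (fun x => x.2) false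
    let n := class_texts.length
    if 0 < n then
      let indices : List Nat := [n / 4, n / 2, 3 * n / 4, 19 * n / 20]
      let indices := (PySem.List.slice indices none (some n_per_class)).map (fun i => min i (n - 1))
      d.insert cls (indices.map (fun (i : Nat) => (PySem.List.pyGetD class_texts ((i : Nat) : Int) ("", 0)).1))
    else d
  (([0, 1] : List Int).foldl step ((PySem.Dict.empty.insert 0 []).insert 1 [])).items

-- ===== PORT B =====
-- tuple comparison x[:2] < pivot[:2] on (word-count, position)
def pvLt2 (a b : Int × Nat × String) : Bool := a.1 < b.1 || (a.1 == b.1 && decide (a.2.1 < b.2.1))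

-- quickselect: k-th smallest by (word-count, position); none only for [] (never reached
-- from the caller). The fuel argument only makes the loop structurally total; pvSelect
-- supplies enough fuel for every input (proved in pv_select_eq).
def pvSelectFuel : Nat → List (Int × Nat × String) → Nat → Option String
  | 0, _, _ => none
  | _ + 1, [], _ => none
  | fuel + 1, p :: rest, k =>
    let l := p :: rest
    let pivot := l[l.length / 2]'(Nat.div_lt_self (Nat.succ_pos rest.length) Nat.one_lt_two)
    let less := l.filter (fun x => pvLt2 x pivot)
    if k < less.length then pvSelectFuel fuel less k
    else if k = less.length then some pivot.2.2
    else pvSelectFuel fuel (l.filter (fun x => pvLt2 pivot x)) (k - less.length - 1)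

def pvSelect (ds : List (Int × Nat × String)) (k : Nat) : Option String :=
  pvSelectFuel ds.length ds k

-- items = [(len(t.split()), i, t) for i, (t, l) in enumerate(zip(texts, labels)) if l == cls]
def pvItems (texts : List String) (labels : List Int) (cls : Int) : List (Int × Nat × String) :=
  ((texts.zip labels).zipIdx).filterMap (fun q =>
    if q.1.2 == cls then some (((PySem.Str.split₀ q.1.1).length : Int), q.2, q.1.1) else none)

def get_representative_samples_alt (texts : List String) (labels : List Int) (n_per_class : Int) : List (Int × List String) :=
  let f := fun (cls : Int) =>
    let items := pvItems texts labels cls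
    let n := items.length
    if 0 < n then
      let ks : List Nat := PySem.List.slice [n / 4, n / 2, 3 * n / 4, 19 * n / 20] none (some n_per_class)
      ks.map (fun k => (pvSelect items (min k (n - 1))).getD "")
    else []
  [(0, f 0), (1, f 1)]

-- ===== PRECONDITION & SPEC =====
-- Pre_ excludes exactly the inputs where A raises IndexError: a label 0 or 1 at a position
-- with no corresponding text (A evaluates texts[i] there).
def Pre_get_representative_samples (texts : List String) (labels : List Int) (n_per_class : Int) : Prop :=
  ∀ i, i < labels.length → (labels.getD i 0 = 0 ∨ labels.getD i 0 = 1) → i < texts.length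
instance (texts : List String) (labels : List Int) (n_per_class : Int) : Decidable (Pre_get_representative_samples texts labels n_per_class) := by unfold Pre_get_representative_samples; infer_instance

def pvWitness_get_representative_samples : List String × List Int × Int := (["a b", "c", "d d d"], [1, 0, 1], 4)

def Spec_get_representative_samples (texts : List String) (labels : List Int) (n_per_class : Int) (out : List (Int × List String)) : Prop := out = get_representative_samples_alt texts labels n_per_class
instance (texts : List String) (labels : List Int) (n_per_class : Int) (out : List (Int × List String)) : Decidable (Spec_get_representative_samples texts labels n_per_class out) := by unfold Spec_get_representative_samples; infer_instance

-- ===== CLAIM (what is proved, stated in full; the proofs are below) =====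
def Claim_equal_get_representative_samples : Prop := ∀ (texts : List String) (labels : List Int) (n_per_class : Int), Dom_get_representative_samples texts labels n_per_class → Pre_get_representative_samples texts labels n_per_class → Spec_get_representative_samples texts labels n_per_class (get_representative_samples texts labels n_per_class)


-- ===== LEMMAS AND PROOFS =====

-- the lexicographic key quickselect compares by, and the projection back to A's pairs
def pvKey (d : Int × Nat × String) : Int ×ₗ Int := toLex (d.1, (d.2.1 : Int))
def pvF (d : Int × Nat × String) : String × Int := (d.2.2, d.1)
-- the specification sort: items in increasing (word-count, position) order
def pvS (ds : List (Int × Nat × String)) : List (Int × Nat × String) :=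
  PySem.List.sorted ds pvKey false

theorem pvLt2_eq (a b : Int × Nat × String) : pvLt2 a b = decide (pvKey a < pvKey b) := by
  simp only [pvLt2, pvKey, Prod.Lex.lt_iff]
  by_cases h1 : a.1 < b.1 <;> by_cases h2 : a.1 = b.1 <;>
    by_cases h3 : a.2.1 < b.2.1 <;> simp [h1, h2, h3]

theorem pv_insertBy_map_congr {α β : Type} (b : β → β → Bool) (b' : α → α → Bool)
    (f : α → β) (x : α) (ys : List α) (h : ∀ y ∈ ys, b (f x) (f y) = b' x y) :
    PySem.List.insertBy b (f x) (ys.map f) = (PySem.List.insertBy b' x ys).map f := by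
  induction ys with
  | nil => simp [PySem.List.insertBy]
  | cons y ys ih =>
    have hy := h y (by simp)
    simp only [List.map_cons, PySem.List.insertBy, hy]
    cases hb : b' x y
    · rw [if_neg (by simp [hb]), if_neg (by simp [hb]), ih (fun z hz => h z (by simp [hz]))]
      simp
    · simp [hb]

-- stability of A's length sort, decorated: folding insertBy on the pairs tracks folding
-- lexicographic insertBy on the items, as long as every new item has a larger position
theorem pv_fold_insert (ds acc : List (Int × Nat × String))
    (hds : ds.Pairwise (fun a b => a.2.1 < b.2.1))
    (hacc : ∀ d ∈ ds, ∀ y ∈ acc, y.2.1 < d.2.1) :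
    ds.foldl (fun a d => PySem.List.insertBy (fun u v => decide (u.2 < v.2)) (pvF d) a) (acc.map pvF)
      = (ds.foldl (fun a d => PySem.List.insertBy (fun u v => decide (pvKey u < pvKey v)) d a) acc).map pvF := by
  induction ds generalizing acc with
  | nil => simp
  | cons d ds ih =>
    simp only [List.foldl_cons]
    rw [pv_insertBy_map_congr (fun u v : String × Int => decide (u.2 < v.2)) (fun u v => decide (pvKey u < pvKey v)) pvF d acc (fun y hy => by
      have hyd : y.2.1 < d.2.1 := hacc d (by simp) y hy
      simp only [pvF, pvKey, decide_eq_decide]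
      rw [Prod.Lex.lt_iff]
      simp only [ofLex_toLex]
      omega)]
    exact ih (PySem.List.insertBy (fun u v => decide (pvKey u < pvKey v)) d acc) hds.tail (fun e he y hy => by
      rcases (PySem.List.mem_insertBy _ d y acc).1 hy with rfl | hy
      · exact (List.pairwise_cons.1 hds).1 e he
      · exact Nat.lt_trans (hacc d (by simp) y hy) ((List.pairwise_cons.1 hds).1 e he))

-- A's stable sort of the (text, word-count) pairs is the lexicographic sort of the items, projected
theorem pv_sorted_pairs (items : List (Int × Nat × String))
    (hinc : items.Pairwise (fun a b => a.2.1 < b.2.1)) :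
    PySem.List.sorted (items.map pvF) (fun x => x.2) false = (pvS items).map pvF := by
  rw [PySem.List.sorted_eq_foldl_insertBy, pvS, PySem.List.sorted_eq_foldl_insertBy,
    List.foldl_map]
  simpa using pv_fold_insert items [] hinc (by simp)

theorem pv_nodup_key_of_inc (items : List (Int × Nat × String))
    (hinc : items.Pairwise (fun a b => a.2.1 < b.2.1)) :
    (items.map pvKey).Nodup := by
  rw [List.Nodup, List.pairwise_map]
  refine hinc.imp ?_
  intro a b hab he
  have h2 : (a.2.1 : Int) = b.2.1 := congrArg Prod.snd (toLex.injective he)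
  omega

theorem pv_filter_eq_key (l : List (Int × Nat × String)) (x : Int × Nat × String)
    (hnd : (l.map pvKey).Nodup) (hx : x ∈ l) :
    l.filter (fun y => pvKey y == pvKey x) = [x] := by
  induction l with
  | nil => simp at hx
  | cons a l ih =>
    rw [List.map_cons, List.nodup_cons] at hnd
    rcases List.mem_cons.1 hx with rfl | hx
    · rw [List.filter_cons_of_pos (by simp), List.filter_eq_nil_iff.2, List.cons.injEq]
      · exact ⟨rfl, rfl⟩
      · intro y hy h
        exact hnd.1 (List.mem_map.2 ⟨y, hy, (beq_iff_eq.1 h)⟩)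
    · have ha : pvKey a ≠ pvKey x := by
        intro h
        exact hnd.1 (List.mem_map.2 ⟨x, hx, h.symm⟩)
      rw [List.filter_cons_of_neg (by simpa using ha)]
      exact ih hnd.2 hx

theorem pv_pairwise_lt_of_nodup (l : List (Int × Nat × String))
    (hle : l.Pairwise (fun a b => pvKey a ≤ pvKey b)) (hnd : (l.map pvKey).Nodup) :
    l.Pairwise (fun a b => pvKey a < pvKey b) := by
  rw [List.Nodup, List.pairwise_map] at hnd
  exact (hle.and hnd).imp (fun {a b} h => lt_of_le_of_ne h.1 h.2)

theorem pv_S_decomp (l : List (Int × Nat × String)) (pivot : Int × Nat × String)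
    (hnd : (l.map pvKey).Nodup) (hp : pivot ∈ l) :
    pvS l = pvS (l.filter (fun x => pvLt2 x pivot)) ++ pivot :: pvS (l.filter (fun x => pvLt2 pivot x)) := by
  have hmemless : ∀ y ∈ l.filter (fun x => pvLt2 x pivot), pvKey y < pvKey pivot := by
    intro y hy
    have := List.of_mem_filter hy
    rwa [pvLt2_eq, decide_eq_true_eq] at this
  have hmemgt : ∀ y ∈ l.filter (fun x => pvLt2 pivot x), pvKey pivot < pvKey y := by
    intro y hy
    have := List.of_mem_filter hy
    rwa [pvLt2_eq, decide_eq_true_eq] at this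
  -- the not-less part is pivot together with the strictly-greater part
  have hsplit : (l.filter (fun x => !pvLt2 x pivot)).Perm
      (pivot :: l.filter (fun x => pvLt2 pivot x)) := by
    have h1 : (l.filter (fun x => pvLt2 pivot x) ++
        l.filter (fun x => !pvLt2 pivot x && !pvLt2 x pivot)).Perm (l.filter (fun x => !pvLt2 x pivot)) := by
      have := List.filter_append_perm (fun x => pvLt2 pivot x) (l.filter (fun x => !pvLt2 x pivot))
      rw [List.filter_filter, List.filter_filter] at this
      have e1 : l.filter (fun a => pvLt2 pivot a && !pvLt2 a pivot) = l.filter (fun x => pvLt2 pivot x) := by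
        apply List.filter_congr
        intro x _
        simp only [pvLt2_eq]
        by_cases h : pvKey pivot < pvKey x <;> simp [h, not_lt_of_gt]
      rwa [e1] at this
    have h2 : l.filter (fun x => !pvLt2 pivot x && !pvLt2 x pivot) = [pivot] := by
      rw [show (fun x : Int × Nat × String => !pvLt2 pivot x && !pvLt2 x pivot) = (fun y => pvKey y == pvKey pivot) from ?_]
      · exact pv_filter_eq_key l pivot hnd hp
      · funext x
        simp only [pvLt2_eq]
        rcases lt_trichotomy (pvKey x) (pvKey pivot) with h | h | h
        · simp [h, ne_of_lt h, not_lt_of_gt h]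
        · simp [h]
        · simp [h, ne_of_gt h, not_lt_of_gt h]
    rw [h2] at h1
    exact h1.symm.trans List.perm_append_comm
  have hndS : ∀ m : List (Int × Nat × String), m.Sublist l → ((pvS m).map pvKey).Nodup := by
    intro m hm
    refine ((PySem.List.sorted_perm m pvKey false).map pvKey).nodup_iff.2 ?_
    exact (hm.map pvKey).nodup hnd
  have hpw : (pvS (l.filter (fun x => pvLt2 x pivot)) ++ pivot :: pvS (l.filter (fun x => pvLt2 pivot x))).Pairwise
      (fun a b => pvKey a < pvKey b) := by
    rw [List.pairwise_append]
    refine ⟨pv_pairwise_lt_of_nodup _ (PySem.List.sorted_pairwise _ _) (hndS _ (List.filter_sublist)), ?_, ?_⟩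
    · rw [List.pairwise_cons]
      refine ⟨fun y hy => hmemgt y ((PySem.List.sorted_perm _ pvKey false).mem_iff.1 hy), ?_⟩
      exact pv_pairwise_lt_of_nodup _ (PySem.List.sorted_pairwise _ _) (hndS _ (List.filter_sublist))
    · intro a ha b hb
      have ha' := hmemless a ((PySem.List.sorted_perm _ pvKey false).mem_iff.1 ha)
      rcases List.mem_cons.1 hb with rfl | hb
      · exact ha'
      · exact lt_trans ha' (hmemgt b ((PySem.List.sorted_perm _ pvKey false).mem_iff.1 hb))
  have hperm : (pvS (l.filter (fun x => pvLt2 x pivot)) ++ pivot :: pvS (l.filter (fun x => pvLt2 pivot x))).Perm l := by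
    refine ((PySem.List.sorted_perm _ pvKey false).append
      ((PySem.List.sorted_perm _ pvKey false).cons pivot)).trans ?_
    refine ((hsplit.symm).append_left _).trans ?_
    exact List.filter_append_perm _ l
  exact PySem.List.sorted_eq_of_perm_of_pairwise_lt l _ pvKey hperm hpw

theorem pv_selectFuel_eq (fuel : Nat) : ∀ (ds : List (Int × Nat × String)) (k : Nat),
    ds.length ≤ fuel → (ds.map pvKey).Nodup → ∀ hk : k < ds.length,
    pvSelectFuel fuel ds k = some ((pvS ds)[k]'(by rw [pvS, PySem.List.length_sorted]; exact hk)).2.2 := by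
  induction fuel with
  | zero => intro ds k hf _ hk; omega
  | succ fuel ih =>
    intro ds k hf hnd hk
    match ds with
    | [] => simp at hk
    | p :: rest =>
      have hpiv : (p :: rest)[(p :: rest).length / 2]'(Nat.div_lt_self (Nat.succ_pos rest.length) Nat.one_lt_two) ∈ p :: rest :=
        List.getElem_mem _
      set pivot := (p :: rest)[(p :: rest).length / 2]'(Nat.div_lt_self (Nat.succ_pos rest.length) Nat.one_lt_two) with hpivdef
      have hdec := pv_S_decomp (p :: rest) pivot hnd hpiv
      set less := (p :: rest).filter (fun x => pvLt2 x pivot) with hlessdef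
      set gtr := (p :: rest).filter (fun x => pvLt2 pivot x) with hgtrdef
      have hlenless : less.length < (p :: rest).length :=
        List.length_filter_lt_length_iff_exists.2 ⟨pivot, hpiv, by simp [pvLt2]⟩
      have hlengtr : gtr.length < (p :: rest).length :=
        List.length_filter_lt_length_iff_exists.2 ⟨pivot, hpiv, by simp [pvLt2]⟩
      have hndless : (less.map pvKey).Nodup := ((List.filter_sublist).map pvKey).nodup hnd
      have hndgtr : (gtr.map pvKey).Nodup := ((List.filter_sublist).map pvKey).nodup hnd
      have hlentot : (p :: rest).length = less.length + 1 + gtr.length := by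
        have h := congrArg List.length hdec
        simp only [pvS, PySem.List.length_sorted, List.length_append, List.length_cons] at h
        simp only [List.length_cons]
        omega
      have hklen : k < (pvS less ++ pivot :: pvS gtr).length := by
        simp only [pvS, List.length_append, List.length_cons, PySem.List.length_sorted]
        omega
      change (if k < less.length then pvSelectFuel fuel less k
        else if k = less.length then some pivot.2.2
        else pvSelectFuel fuel gtr (k - less.length - 1)) = _
      have hlenSless : (pvS less).length = less.length := by
        rw [pvS, PySem.List.length_sorted]
      have hkS : k < (pvS (p :: rest)).length := by
        rw [pvS, PySem.List.length_sorted]; exact hk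
      split_ifs with h1 h2
      · rw [ih less k (by omega) hndless h1]
        congr 1
        rw [List.getElem_of_eq hdec hkS, List.getElem_append hklen]
        rw [dif_pos (by omega)]
      · rw [List.getElem_of_eq hdec hkS, List.getElem_append hklen, dif_neg (by omega)]
        have h0 : k - (pvS less).length = 0 := by omega
        simp [h0]
      · have hk' : k - less.length - 1 < gtr.length := by omega
        rw [ih gtr (k - less.length - 1) (by omega) hndgtr hk']
        congr 1
        rw [List.getElem_of_eq hdec hkS, List.getElem_append hklen, dif_neg (by omega)]
        have hidx : k - (pvS less).length = (k - less.length - 1) + 1 := by omega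
        simp only [hidx, List.getElem_cons_succ]

theorem pv_items_inc (texts : List String) (labels : List Int) (cls : Int) :
    (pvItems texts labels cls).Pairwise (fun a b => a.2.1 < b.2.1) := by
  unfold pvItems
  refine List.Pairwise.filterMap (R := fun a b : (String × Int) × Nat => a.2 < b.2) _ ?_ ?_
  · intro a a' r b hb b' hb'
    split_ifs at hb hb'
    simp only [Option.some.injEq] at hb hb'
    subst hb hb'
    exact r
  · have : ∀ (xs : List (String × Int)) (s : Nat),
        (xs.zipIdx s).Pairwise (fun a b => a.2 < b.2) := by
      intro xs
      induction xs with
      | nil => intro s; simp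
      | cons x xs ih =>
        intro s
        rw [List.zipIdx_cons, List.pairwise_cons]
        exact ⟨fun q hq => by
          rcases q with ⟨y, i⟩
          have := (List.mem_zipIdx hq).1
          omega, ih (s + 1)⟩
    exact this _ 0

theorem pv_items_map (texts : List String) (labels : List Int) (cls : Int) :
    (pvItems texts labels cls).map pvF
      = (texts.zip labels).filterMap (fun q =>
          if q.2 == cls then some (q.1, ((PySem.Str.split₀ q.1).length : Int)) else none) := by
  unfold pvItems
  have : ∀ (xs : List (String × Int)) (s : Nat),
      ((xs.zipIdx s).filterMap (fun q =>
        if q.1.2 == cls then some (((PySem.Str.split₀ q.1.1).length : Int), q.2, q.1.1) else none)).map pvF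
      = xs.filterMap (fun q =>
          if q.2 == cls then some (q.1, ((PySem.Str.split₀ q.1).length : Int)) else none) := by
    intro xs
    induction xs with
    | nil => intro s; simp
    | cons x xs ih =>
      intro s
      rw [List.zipIdx_cons, List.filterMap_cons, List.filterMap_cons]
      by_cases h : (x.2 == cls) = true
      · simp only [if_pos h, List.map_cons]
        rw [show pvF (((PySem.Str.split₀ x.1).length : Int), s, x.1)
          = (x.1, ((PySem.Str.split₀ x.1).length : Int)) from rfl, ih (s + 1)]
      · simp only [if_neg h]
        exact ih (s + 1)
  exact this _ 0

theorem pv_classTexts_eq (texts : List String) (labels : List Int) (cls : Int)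
    (hcls : cls = 0 ∨ cls = 1)
    (hpre : ∀ i, i < labels.length → (labels.getD i 0 = 0 ∨ labels.getD i 0 = 1) → i < texts.length) :
    pvClassTexts texts labels cls = (pvItems texts labels cls).map pvF := by
  rw [pv_items_map, pvClassTexts, PySem.List.pyRange_zero_natCast, List.filterMap_map]
  have main : ∀ (ls : List Int) (ts : List String),
      (∀ i, i < ls.length → (ls.getD i 0 = 0 ∨ ls.getD i 0 = 1) → i < ts.length) →
      (List.range ls.length).filterMap ((fun i =>
        if PySem.List.pyGetD ls i 0 == cls then
          some (PySem.List.pyGetD ts i "", ((PySem.Str.split₀ (PySem.List.pyGetD ts i "")).length : Int))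
        else none) ∘ (fun k : Nat => (k : Int)))
      = (ts.zip ls).filterMap (fun q =>
          if q.2 == cls then some (q.1, ((PySem.Str.split₀ q.1).length : Int)) else none) := by
    intro ls
    induction ls with
    | nil => intro ts _; simp
    | cons l ls ih =>
      intro ts hpre'
      rw [List.length_cons, List.range_succ_eq_map, List.filterMap_cons, List.filterMap_map]
      have htail : List.filterMap (((fun i : Int =>
            if PySem.List.pyGetD (l :: ls) i 0 == cls then
              some (PySem.List.pyGetD ts i "", ((PySem.Str.split₀ (PySem.List.pyGetD ts i "")).length : Int))
            else none) ∘ (fun k : Nat => (k : Int))) ∘ Nat.succ) (List.range ls.length)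
          = List.filterMap ((fun i : Int =>
            if PySem.List.pyGetD ls i 0 == cls then
              some (PySem.List.pyGetD ts.tail i "", ((PySem.Str.split₀ (PySem.List.pyGetD ts.tail i "")).length : Int))
            else none) ∘ (fun k : Nat => (k : Int))) (List.range ls.length) := by
        refine List.filterMap_congr (fun k _ => ?_)
        simp only [Function.comp_apply, PySem.List.pyGetD_natCast, Nat.succ_eq_add_one,
          List.getD_cons_succ]
        cases ts with
        | nil => rfl
        | cons t ts => simp only [List.tail_cons, List.getD_cons_succ]
      rw [htail]
      match ts with
      | [] =>
        have hnone : ∀ i, i < (l :: ls).length → ¬ ((l :: ls).getD i 0 = 0 ∨ (l :: ls).getD i 0 = 1) := by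
          intro i hi h
          have := hpre' i hi h
          simp at this
        have hl : (l == cls) = false := by
          have := hnone 0 (by simp)
          simp only [List.getD_cons_zero] at this
          simp only [beq_eq_false_iff_ne, ne_eq]
          omega
        simp only [Function.comp_apply, Nat.cast_zero, PySem.List.pyGetD_zero_cons, hl,
          Bool.false_eq_true, if_false, List.zip_nil_left, List.filterMap_nil, List.tail_nil]
        refine List.filterMap_eq_nil_iff.2 (fun k hk => ?_)
        have hk' : k < ls.length := List.mem_range.1 hk
        have := hnone (k + 1) (by simpa using hk')
        simp only [List.getD_cons_succ] at this
        have hne : (ls.getD k 0 == cls) = false := by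
          simp only [beq_eq_false_iff_ne, ne_eq]
          omega
        simp only [Function.comp_apply, PySem.List.pyGetD_natCast, hne, Bool.false_eq_true,
          if_false]
      | t :: ts =>
        have ihx := ih (t :: ts).tail (fun i hi h => by
          have := hpre' (i + 1) (by simpa using hi) (by simpa using h)
          simpa using this)
        rw [ihx]
        simp only [Function.comp_apply, Nat.cast_zero, PySem.List.pyGetD_zero_cons,
          List.tail_cons, List.zip_cons_cons, List.filterMap_cons]
  exact main labels texts hpre

-- per-class: one selected entry of A's sorted list is what quickselect returns
theorem pv_point (texts : List String) (labels : List Int) (cls : Int)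
    (hcls : cls = 0 ∨ cls = 1)
    (hpre : ∀ i, i < labels.length → (labels.getD i 0 = 0 ∨ labels.getD i 0 = 1) → i < texts.length)
    (k : Nat) (hpos : 0 < (pvItems texts labels cls).length) :
    (PySem.List.pyGetD (PySem.List.sorted (pvClassTexts texts labels cls) (fun x => x.2) false)
      ((min k ((pvItems texts labels cls).length - 1) : Nat) : Int) ("", 0)).1
    = (pvSelect (pvItems texts labels cls) (min k ((pvItems texts labels cls).length - 1))).getD "" := by
  set items := pvItems texts labels cls with hitems
  have hinc := pv_items_inc texts labels cls
  have hnd := pv_nodup_key_of_inc items hinc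
  set i := min k (items.length - 1) with hidef
  have hi : i < items.length := by omega
  have hsp : PySem.List.sorted (pvClassTexts texts labels cls) (fun x => x.2) false
      = (pvS items).map pvF := by
    rw [pv_classTexts_eq texts labels cls hcls hpre, pv_sorted_pairs items hinc]
  have hiS : i < ((pvS items).map pvF).length := by
    rw [List.length_map, pvS, PySem.List.length_sorted]; exact hi
  rw [hsp, PySem.List.pyGetD_natCast, List.getD_eq_getElem _ _ hiS, List.getElem_map]
  rw [pvSelect, pv_selectFuel_eq items.length items i (le_refl _) hnd hi]
  rfl

-- per-class: A's if-branch payload equals B's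
theorem pv_payload (texts : List String) (labels : List Int) (cls n_per_class : Int)
    (hcls : cls = 0 ∨ cls = 1)
    (hpre : ∀ i, i < labels.length → (labels.getD i 0 = 0 ∨ labels.getD i 0 = 1) → i < texts.length)
    (hpos : 0 < (pvItems texts labels cls).length) :
    (let class_texts := PySem.List.sorted (pvClassTexts texts labels cls) (fun x => x.2) false
     let n := class_texts.length
     ((PySem.List.slice [n / 4, n / 2, 3 * n / 4, 19 * n / 20] none (some n_per_class)).map
        (fun i => min i (n - 1))).map
       (fun (i : Nat) => (PySem.List.pyGetD class_texts ((i : Nat) : Int) ("", 0)).1))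
    = (let n := (pvItems texts labels cls).length
       (PySem.List.slice [n / 4, n / 2, 3 * n / 4, 19 * n / 20] none (some n_per_class)).map
         (fun k => (pvSelect (pvItems texts labels cls) (min k (n - 1))).getD "")) := by
  have hlen : (PySem.List.sorted (pvClassTexts texts labels cls) (fun x => x.2) false).length
      = (pvItems texts labels cls).length := by
    rw [PySem.List.length_sorted, pv_classTexts_eq texts labels cls hcls hpre, List.length_map]
  simp only [hlen, List.map_map]
  refine List.map_congr_left (fun k _ => ?_)
  simp only [Function.comp_apply]
  exact pv_point texts labels cls hcls hpre k hpos

theorem pv_dict_items_11 (v0 v1 : List String) :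
    ((((PySem.Dict.empty.insert 0 []).insert 1 []).insert (0 : Int) v0).insert 1 v1).items
      = [(0, v0), (1, v1)] := rfl
theorem pv_dict_items_10 (v0 : List String) :
    (((PySem.Dict.empty.insert 0 []).insert 1 []).insert (0 : Int) v0).items
      = [(0, v0), (1, [])] := rfl
theorem pv_dict_items_01 (v1 : List String) :
    (((PySem.Dict.empty.insert 0 []).insert 1 []).insert (1 : Int) v1).items
      = [(0, []), (1, v1)] := rfl
theorem pv_dict_items_00 :
    (((PySem.Dict.empty.insert (0 : Int) ([] : List String)).insert 1 [])).items
      = [(0, []), (1, [])] := rfl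

-- ===== VERDICT (by name: the statement is the Claim_ definition above) =====
theorem get_representative_samples_spec : Claim_equal_get_representative_samples := by
  intro texts labels n_per_class _ hpre
  unfold Spec_get_representative_samples
  unfold get_representative_samples get_representative_samples_alt
  simp only [List.foldl_cons, List.foldl_nil]
  have hlen0 : (PySem.List.sorted (pvClassTexts texts labels 0) (fun x => x.2) false).length
      = (pvItems texts labels 0).length := by
    rw [PySem.List.length_sorted, pv_classTexts_eq texts labels 0 (Or.inl rfl) hpre, List.length_map]
  have hlen1 : (PySem.List.sorted (pvClassTexts texts labels 1) (fun x => x.2) false).length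
      = (pvItems texts labels 1).length := by
    rw [PySem.List.length_sorted, pv_classTexts_eq texts labels 1 (Or.inr rfl) hpre, List.length_map]
  by_cases h0 : 0 < (pvItems texts labels 0).length <;>
    by_cases h1 : 0 < (pvItems texts labels 1).length <;>
      simp only [hlen0, hlen1, h0, h1, if_true, if_false]
  · have e0 := pv_payload texts labels 0 n_per_class (Or.inl rfl) hpre h0
    have e1 := pv_payload texts labels 1 n_per_class (Or.inr rfl) hpre h1
    simp only [hlen0] at e0
    simp only [hlen1] at e1
    rw [e0, e1, pv_dict_items_11]
  · have e0 := pv_payload texts labels 0 n_per_class (Or.inl rfl) hpre h0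
    simp only [hlen0] at e0
    rw [e0, pv_dict_items_10]
  · have e1 := pv_payload texts labels 1 n_per_class (Or.inr rfl) hpre h1
    simp only [hlen1] at e1
    rw [e1, pv_dict_items_01]
  · rw [pv_dict_items_00]
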